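-- pv_equiv track=rewrite | github.com/Gnoyong/xrpa_core | src/xrpa_core/feishu/feishu_sync.py | _group_row_updates
-- ===== SOURCE A (Python) =====
-- def _group_row_updates(
--     updates: list[tuple[int, list[str]]]
-- ) -> list[tuple[int, list[list[str]]]]:
--     grouped: list[tuple[int, list[list[str]]]] = []
--     start_row: int | None = None
--     batch: list[list[str]] = []
--     prev_row: int | None = None
--
--     for row_index, row_values in updates:
--         if start_row is None:
--             start_row = row_index
--             batch = [row_values]
--             prev_row = row_index
--             continue
--
--         if prev_row is not None and row_index == prev_row + 1:
--             batch.append(row_values)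
--         else:
--             grouped.append((start_row, batch))
--             start_row = row_index
--             batch = [row_values]
--         prev_row = row_index
--
--     if start_row is not None and batch:
--         grouped.append((start_row, batch))
--
--     return grouped
-- ===== SOURCE B (Python) =====
-- from itertools import groupby
--
--
-- def _group_row_updates(
--     updates: list[tuple[int, list[str]]]
-- ) -> list[tuple[int, list[list[str]]]]:
--     grouped: list[tuple[int, list[list[str]]]] = []
--     for _, grp in groupby(enumerate(updates), key=lambda t: t[1][0] - t[0]):
--         members = [u for _, u in grp]
--         grouped.append((members[0][0], [values for _, values in members]))
--     return grouped
-- ===== Notes on version B (the rewrite author's own statement) =====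
-- stated objective: idiomatic
-- what changed: Replaces the manual start_row/prev_row/batch state machine with itertools.groupby over enumerate(updates) keyed by row_index minus position, the standard consecutive-run grouping idiom.
import Mathlib
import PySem

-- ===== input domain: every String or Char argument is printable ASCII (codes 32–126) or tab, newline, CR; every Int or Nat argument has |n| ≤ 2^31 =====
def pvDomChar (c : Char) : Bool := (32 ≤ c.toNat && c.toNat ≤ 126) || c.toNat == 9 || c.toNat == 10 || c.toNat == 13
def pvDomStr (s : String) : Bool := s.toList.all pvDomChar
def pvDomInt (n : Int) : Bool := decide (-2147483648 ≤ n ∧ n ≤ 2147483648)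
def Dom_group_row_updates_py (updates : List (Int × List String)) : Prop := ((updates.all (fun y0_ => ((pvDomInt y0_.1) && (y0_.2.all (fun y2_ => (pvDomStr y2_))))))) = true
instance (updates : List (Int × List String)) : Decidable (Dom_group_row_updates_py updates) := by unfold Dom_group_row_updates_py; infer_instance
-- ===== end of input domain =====

-- B replaces A's manual start_row/prev_row/batch state machine with the standard
-- consecutive-run grouping idiom (groupby over enumerate keyed by row_index - position); idiomatic, same cost.

-- ===== PORT A =====
-- the for-loop of A as structural recursion over the same state
-- (grouped, start_row, batch, prev_row); the [] case is the code after the loop.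
def pvALoop : List (Int × List String) → List (Int × List (List String)) →
    Option Int → List (List String) → Option Int → List (Int × List (List String))
  | [], grouped, startRow, batch, _ =>
    match startRow with
    | some s => if batch ≠ [] then grouped ++ [(s, batch)] else grouped
    | none => grouped
  | (ri, rv) :: rest, grouped, startRow, batch, prevRow =>
    match startRow with
    | none => pvALoop rest grouped (some ri) [rv] (some ri)
    | some s =>
      match prevRow with
      | some p =>
        if ri = p + 1 then
          pvALoop rest grouped (some s) (batch ++ [rv]) (some ri)
        else
          pvALoop rest (grouped ++ [(s, batch)]) (some ri) [rv] (some ri)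
      | none => pvALoop rest (grouped ++ [(s, batch)]) (some ri) [rv] (some ri)

def group_row_updates_py (updates : List (Int × List String)) : List (Int × List (List String)) :=
  pvALoop updates [] none [] none

-- ===== PORT B =====
-- enumerate(updates) starting at index i
def pvEnumFrom (i : Nat) : List (Int × List String) → List (Nat × (Int × List String))
  | [] => []
  | x :: xs => (i, x) :: pvEnumFrom (i + 1) xs

-- groupby's key: row_index - position
def pvKey (t : Nat × (Int × List String)) : Int := t.2.1 - (t.1 : Int)

-- the members of one groupby run (those with the given key) and the remainder
def pvSplitRun (k : Int) : List (Nat × (Int × List String)) →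
    List (Nat × (Int × List String)) × List (Nat × (Int × List String))
  | [] => ([], [])
  | x :: xs =>
    if pvKey x = k then
      let pr := pvSplitRun k xs
      (x :: pr.1, pr.2)
    else ([], x :: xs)

theorem pvSplitRun_snd_length (k : Int) (l : List (Nat × (Int × List String))) :
    (pvSplitRun k l).2.length ≤ l.length := by
  induction l with
  | nil => simp [pvSplitRun]
  | cons x xs ih =>
    simp only [pvSplitRun]
    split
    · simp; omega
    · simp

-- the groupby loop: for each run, (first member's row_index, its row_values in order)
def pvGroups : List (Nat × (Int × List String)) → List (Int × List (List String))
  | [] => []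
  | x :: xs =>
    let pr := pvSplitRun (pvKey x) xs
    (x.2.1, x.2.2 :: pr.1.map (fun t => t.2.2)) :: pvGroups pr.2
termination_by l => l.length
decreasing_by
  have := pvSplitRun_snd_length (pvKey x) xs
  simp only [List.length_cons]; omega

def group_row_updates_py_alt (updates : List (Int × List String)) : List (Int × List (List String)) :=
  pvGroups (pvEnumFrom 0 updates)

-- ===== PRECONDITION & SPEC =====
def Spec_group_row_updates_py (updates : List (Int × List String)) (out : List (Int × List (List String))) : Prop := out = group_row_updates_py_alt updates
instance (updates : List (Int × List String)) (out : List (Int × List (List String))) : Decidable (Spec_group_row_updates_py updates out) := by unfold Spec_group_row_updates_py; infer_instance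

-- ===== CLAIM (what is proved, stated in full; the proofs are below) =====
def Claim_equal_group_row_updates_py : Prop := ∀ (updates : List (Int × List String)), Dom_group_row_updates_py updates → Spec_group_row_updates_py updates (group_row_updates_py updates)

-- ===== LEMMAS AND PROOFS =====

-- Main invariant: mid-run, A's loop with open batch (last row p, next enumerate
-- index i, so the open run's key is p + 1 - i) produces grouped ++ the current
-- group completed by the rest of the run, followed by B's grouping of the remainder.
theorem pvALoop_eq (rest : List (Int × List String)) :
    ∀ (i : Nat) (grouped : List (Int × List (List String))) (s : Int)
      (batch : List (List String)) (p : Int), batch ≠ [] →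
    pvALoop rest grouped (some s) batch (some p) =
      grouped ++ (s, batch ++ (pvSplitRun (p + 1 - (i : Int)) (pvEnumFrom i rest)).1.map
          (fun t => t.2.2)) ::
        pvGroups (pvSplitRun (p + 1 - (i : Int)) (pvEnumFrom i rest)).2 := by
  induction rest with
  | nil =>
    intro i grouped s batch p hb
    simp [pvALoop, pvEnumFrom, pvSplitRun, pvGroups, hb]
  | cons hd tl ih =>
    intro i grouped s batch p hb
    obtain ⟨ri, rv⟩ := hd
    simp only [pvALoop, pvEnumFrom]
    by_cases h : ri = p + 1
    · have hkey : pvKey (i, (ri, rv)) = p + 1 - (i : Int) := by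
        simp [pvKey, h]
      rw [if_pos h]
      rw [ih (i + 1) grouped s (batch ++ [rv]) ri (by simp)]
      have hkey2 : ri + 1 - ((i : Nat) + 1 : Int) = p + 1 - (i : Int) := by omega
      simp only [pvSplitRun, hkey]
      push_cast
      push_cast at hkey2
      rw [hkey2]
      simp
    · have hkey : ¬ pvKey (i, (ri, rv)) = p + 1 - (i : Int) := by
        simp [pvKey]; omega
      rw [if_neg h]
      rw [ih (i + 1) (grouped ++ [(s, batch)]) ri [rv] ri (by simp)]
      simp only [pvSplitRun, if_neg hkey]
      have : pvGroups ((i, (ri, rv)) :: pvEnumFrom (i + 1) tl) =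
          (ri, rv :: (pvSplitRun (pvKey (i, (ri, rv))) (pvEnumFrom (i + 1) tl)).1.map
            (fun t => t.2.2)) ::
          pvGroups (pvSplitRun (pvKey (i, (ri, rv))) (pvEnumFrom (i + 1) tl)).2 := by
        simp [pvGroups]
      rw [this]
      have hk2 : pvKey (i, (ri, rv)) = ri + 1 - ((i : Nat) + 1 : Int) := by
        unfold pvKey; push_cast; ring
      rw [hk2]
      push_cast
      simp

-- ===== VERDICT (by name: the statement is the Claim_ definition above) =====
theorem group_row_updates_py_spec : Claim_equal_group_row_updates_py := by
  intro updates _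
  unfold Spec_group_row_updates_py group_row_updates_py group_row_updates_py_alt
  cases updates with
  | nil => simp [pvALoop, pvEnumFrom, pvGroups]
  | cons hd tl =>
    obtain ⟨ri, rv⟩ := hd
    simp only [pvALoop, pvEnumFrom]
    rw [pvALoop_eq tl 1 [] ri [rv] ri (by simp)]
    have : pvGroups ((0, (ri, rv)) :: pvEnumFrom 1 tl) =
        (ri, rv :: (pvSplitRun (pvKey (0, (ri, rv))) (pvEnumFrom 1 tl)).1.map
          (fun t => t.2.2)) ::
        pvGroups (pvSplitRun (pvKey (0, (ri, rv))) (pvEnumFrom 1 tl)).2 := by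
      simp [pvGroups]
    rw [this]
    have hk : pvKey (0, (ri, rv)) = ri + 1 - ((1 : Nat) : Int) := by
      simp [pvKey]
    rw [hk]
    simp
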